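-- pv_equiv track=rewrite | github.com/SABAGHhamed/Lateral_Interpretation_GUI | seismic_gui/tsp.py | split_lines_by_x_trend
-- ===== SOURCE A (Python) =====
-- def split_lines_by_x_trend(stripe_coordinates):
--     """
--     Splits lines based on changes in the x-axis incrementing trend,
--     ensuring that split segments overlap by one point.
--
--     Parameters:
--         stripe_coordinates (list of list of tuple): List of lines, where each line is a list of tuple coordinates (x, y).
--
--     Returns:
--         list of list of tuple: Modified list of lines after splitting.
--     """
--     modified_lines = []
--
--     for line in stripe_coordinates:
--         if len(line) < 2:
--             # Skip lines with less than 2 points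
--             modified_lines.append(line)
--             continue
--
--         # Initialize the current sub-line and determine the initial trend
--         sub_line = [line[0]]
--         increasing = None  # Keeps track of the trend (None for initialization)
--
--         for i in range(1, len(line)):
--             prev_x = line[i - 1][0]
--             curr_x = line[i][0]
--
--             # Determine the current trend
--             if curr_x > prev_x:
--                 current_trend = True  # Increasing
--             elif curr_x < prev_x:
--                 current_trend = False  # Decreasing
--             else:
--                 current_trend = increasing  # No change, continue the same trend
--
--             # Check if the trend has reversed
--             if increasing is not None and current_trend != increasing:
--                 # Add the current sub-line to modified_lines
--                 modified_lines.append(sub_line)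
--                 # Start a new sub-line, ensuring it overlaps with the last point of the previous segment
--                 sub_line = [sub_line[-1]]  # Start with the last point of the current sub-line
--
--             # Update the trend and add the current point to the sub-line
--             increasing = current_trend
--             sub_line.append(line[i])
--
--         # Append the last sub-line
--         if sub_line:
--             modified_lines.append(sub_line)
--
--     return modified_lines
-- ===== SOURCE B (Python) =====
-- def split_lines_by_x_trend(stripe_coordinates):
--     out = []
--     for line in stripe_coordinates:
--         if len(line) < 2:
--             out.append(line)
--             continue
--         # pass 1: record break indices where the running x-trend reverses
--         breaks = []
--         trend = None
--         for i in range(1, len(line)):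
--             if line[i][0] > line[i - 1][0]:
--                 t = True
--             elif line[i][0] < line[i - 1][0]:
--                 t = False
--             else:
--                 t = trend
--             if trend is not None and t != trend:
--                 breaks.append(i)
--             trend = t
--         # pass 2: cut the line by slicing, segments overlapping by one point
--         start = 0
--         for b in breaks:
--             out.append(line[start:b])
--             start = b - 1
--         out.append(line[start:])
--     return out
-- ===== Notes on version B (the rewrite author's own statement) =====
-- stated objective: alternative
-- what changed: B replaces A's growing per-point sub_line with a two-pass scheme: a first pass records the indices where the running x-trend reverses, a second pass cuts each line by slicing line[start:b] with one-point overlap.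
import Mathlib
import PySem

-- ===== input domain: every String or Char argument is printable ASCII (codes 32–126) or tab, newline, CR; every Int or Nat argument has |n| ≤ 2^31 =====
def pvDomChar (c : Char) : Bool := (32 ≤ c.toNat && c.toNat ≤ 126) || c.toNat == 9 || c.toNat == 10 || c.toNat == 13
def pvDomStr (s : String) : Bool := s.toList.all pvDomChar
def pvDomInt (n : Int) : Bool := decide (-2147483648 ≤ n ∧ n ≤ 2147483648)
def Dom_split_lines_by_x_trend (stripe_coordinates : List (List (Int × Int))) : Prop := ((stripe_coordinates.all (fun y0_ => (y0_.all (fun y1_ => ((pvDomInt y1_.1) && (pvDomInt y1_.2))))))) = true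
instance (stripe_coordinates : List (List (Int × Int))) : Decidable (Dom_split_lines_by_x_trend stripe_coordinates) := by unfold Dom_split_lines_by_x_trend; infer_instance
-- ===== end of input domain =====

-- B records break indices in a first pass and cuts the line by slicing in a second pass,
-- instead of A's growing per-point sub_line; objective: alternative decomposition (same cost).

-- ===== PORT A =====
-- inner loop of A: state (modified_lines, sub_line, increasing); prev carries line[i-1]
def pvA_loop (mod : List (List (Int × Int))) (sub : List (Int × Int)) (inc : Option Bool)
    (prev : Int × Int) (rest : List (Int × Int)) : List (List (Int × Int)) × List (Int × Int) :=
  match rest with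
  | [] => (mod, sub)
  | c :: rs =>
    let t : Option Bool := if c.1 > prev.1 then some true else if c.1 < prev.1 then some false else inc
    if inc.isSome ∧ t ≠ inc then
      pvA_loop (mod ++ [sub]) ([sub.getLast!] ++ [c]) t c rs
    else
      pvA_loop mod (sub ++ [c]) t c rs

-- body of A's outer for-loop for one line
def pvA_line (line : List (Int × Int)) : List (List (Int × Int)) :=
  if line.length < 2 then [line]
  else
    match line with
    | [] => [line]  -- unreachable (length ≥ 2)
    | p :: rest =>
      let r := pvA_loop [] [p] none p rest
      r.1 ++ (if r.2.isEmpty then [] else [r.2])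

def split_lines_by_x_trend (stripe_coordinates : List (List (Int × Int))) : List (List (Int × Int)) :=
  stripe_coordinates.foldl (fun acc line => acc ++ pvA_line line) []

-- ===== PORT B =====
-- pass 1 of B: break indices where the running trend reverses (i counts from 1)
def pvB_breaks (i : Nat) (inc : Option Bool) (prev : Int × Int) (rest : List (Int × Int)) : List Nat :=
  match rest with
  | [] => []
  | c :: rs =>
    let t : Option Bool := if c.1 > prev.1 then some true else if c.1 < prev.1 then some false else inc
    if inc.isSome ∧ t ≠ inc then i :: pvB_breaks (i + 1) t c rs
    else pvB_breaks (i + 1) t c rs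

-- pass 2 of B: line[start:b] / line[start:] — drop/take is exact for the nonnegative indices used
def pvB_segs (line : List (Int × Int)) (start : Nat) (bs : List Nat) : List (List (Int × Int)) :=
  match bs with
  | [] => [line.drop start]
  | b :: rest => (line.drop start).take (b - start) :: pvB_segs line (b - 1) rest

def pvB_line (line : List (Int × Int)) : List (List (Int × Int)) :=
  if line.length < 2 then [line]
  else
    match line with
    | [] => [line]  -- unreachable (length ≥ 2)
    | p :: rest => pvB_segs line 0 (pvB_breaks 1 none p rest)

def split_lines_by_x_trend_alt (stripe_coordinates : List (List (Int × Int))) : List (List (Int × Int)) :=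
  stripe_coordinates.flatMap pvB_line

-- ===== PRECONDITION & SPEC =====
def Spec_split_lines_by_x_trend (stripe_coordinates : List (List (Int × Int))) (out : List (List (Int × Int))) : Prop := out = split_lines_by_x_trend_alt stripe_coordinates
instance (stripe_coordinates : List (List (Int × Int))) (out : List (List (Int × Int))) : Decidable (Spec_split_lines_by_x_trend stripe_coordinates out) := by unfold Spec_split_lines_by_x_trend; infer_instance

-- ===== CLAIM (what is proved, stated in full; the proofs are below) =====
def Claim_equal_split_lines_by_x_trend : Prop := ∀ (stripe_coordinates : List (List (Int × Int))), Dom_split_lines_by_x_trend stripe_coordinates → Spec_split_lines_by_x_trend stripe_coordinates (split_lines_by_x_trend stripe_coordinates)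

-- ===== LEMMAS AND PROOFS =====

-- A's sub_line is never empty
lemma pvA_loop_sub_ne_nil (rest : List (Int × Int)) :
    ∀ (mod : List (List (Int × Int))) (sub : List (Int × Int)) inc prev, sub ≠ [] →
      (pvA_loop mod sub inc prev rest).2 ≠ [] := by
  induction rest with
  | nil => intro mod sub inc prev h; simpa [pvA_loop] using h
  | cons c rs ih =>
    intro mod sub inc prev h
    simp only [pvA_loop]
    split_ifs <;> (apply ih; simp)

-- main invariant: A's loop on the suffix starting at index j+d+1 produces the segments B slices
lemma pvA_loop_eq_segs (rest : List (Int × Int)) :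
    ∀ (line : List (Int × Int)) (j d : Nat) (prev : Int × Int) (inc : Option Bool)
      (mod : List (List (Int × Int))) (sub : List (Int × Int)),
      (line.drop j).drop d = prev :: rest →
      sub = (line.drop j).take (d + 1) →
      (pvA_loop mod sub inc prev rest).1 ++ [(pvA_loop mod sub inc prev rest).2]
        = mod ++ pvB_segs line j (pvB_breaks (j + d + 1) inc prev rest) := by
  induction rest with
  | nil =>
    intro line j d prev inc mod sub hdrop hsub
    have hlen : (line.drop j).length = d + 1 := by
      have := congrArg List.length hdrop
      simp [List.length_drop] at this ⊢
      omega
    simp [pvA_loop, pvB_breaks, pvB_segs, hsub, List.take_of_length_le (le_of_eq hlen)]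
  | cons c rs ih =>
    intro line j d prev inc mod sub hdrop hsub
    have hdd : line.drop (j + d) = prev :: c :: rs := by
      rw [← List.drop_drop]; exact hdrop
    have htail : (line.drop j).drop (d + 1) = c :: rs := by
      have h1 := congrArg (List.drop 1) hdrop
      rw [List.drop_drop] at h1
      simpa using h1
    have hlast : sub.getLast! = prev := by
      rw [hsub, List.take_add, hdrop]; simp
    simp only [pvA_loop, pvB_breaks]
    by_cases hbr : inc.isSome ∧ (if c.1 > prev.1 then some true else if c.1 < prev.1 then some false else inc) ≠ inc
    · rw [if_pos hbr, if_pos hbr]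
      have ih' := ih line (j + d) 1 c
        (if c.1 > prev.1 then some true else if c.1 < prev.1 then some false else inc)
        (mod ++ [sub]) ([sub.getLast!] ++ [c]) (by rw [hdd]; rfl) (by rw [hlast, hdd]; simp)
      rw [ih']
      simp only [pvB_segs]
      have e3 : j + d + 1 - j = d + 1 := by omega
      have e4 : j + d + 1 - 1 = j + d := by omega
      rw [e3, e4, ← hsub]
      simp
    · rw [if_neg hbr, if_neg hbr]
      have ih' := ih line j (d + 1) c
        (if c.1 > prev.1 then some true else if c.1 < prev.1 then some false else inc)
        mod (sub ++ [c]) htail (by rw [List.take_add, htail, hsub]; simp)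
      have e5 : j + (d + 1) + 1 = j + d + 1 + 1 := by omega
      rw [e5] at ih'
      exact ih'

-- per-line agreement
lemma pv_line_eq (line : List (Int × Int)) : pvA_line line = pvB_line line := by
  match line with
  | [] => rfl
  | [p] => rfl
  | p :: q :: rs =>
    have main := pvA_loop_eq_segs (q :: rs) (p :: q :: rs) 0 0 p none [] [p] rfl rfl
    have hne := pvA_loop_sub_ne_nil (q :: rs) [] [p] none p (by simp)
    have hemp : (pvA_loop [] [p] none p (q :: rs)).2.isEmpty = false := by
      simpa [List.isEmpty_iff] using hne
    have hlen : ¬ ((p :: q :: rs).length < 2) := by simp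
    simp only [pvA_line, pvB_line, if_neg hlen, hemp]
    simpa using main

-- fold the whole input
lemma pv_fold_eq (sc : List (List (Int × Int))) :
    ∀ acc, sc.foldl (fun acc line => acc ++ pvA_line line) acc = acc ++ sc.flatMap pvB_line := by
  induction sc with
  | nil => intro acc; simp
  | cons l ls ih => intro acc; simp [List.foldl_cons, ih, pv_line_eq l]

-- ===== VERDICT (by name: the statement is the Claim_ definition above) =====
theorem split_lines_by_x_trend_spec : Claim_equal_split_lines_by_x_trend := by
  intro sc _
  unfold Spec_split_lines_by_x_trend split_lines_by_x_trend split_lines_by_x_trend_alt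
  simpa using pv_fold_eq sc []
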